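-- pv_equiv track=rewrite | github.com/melonlay/leetcode-codebase | problems/3517_smallest_palindromic_rearrangement_i/test_solution.py | _reference_solution
-- ===== SOURCE A (Python) =====
-- import collections
--
-- def _reference_solution(s: str) -> str:
--     """Reference implementation (same logic, for validation)."""
--     counts = collections.Counter(s)
--     first_half = []
--     middle_char = ""
--     for char_code in range(ord('a'), ord('z') + 1):
--         char = chr(char_code)
--         if counts[char] > 0:
--             first_half.extend([char] * (counts[char] // 2))
--             if counts[char] % 2 == 1:
--                 middle_char = char
--     first_half_str = "".join(first_half)
--     second_half_str = "".join(first_half[::-1])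
--     return first_half_str + middle_char + second_half_str
-- ===== SOURCE B (Python) =====
-- def _reference_solution(s: str) -> str:
--     """Sort the lowercase letters and scan the runs, instead of a Counter plus a
--     fixed a..z loop."""
--     chars = sorted(c for c in s if 'a' <= c <= 'z')
--     runs = []  # consecutive (char, run_length) pairs, built in one pass
--     for c in chars:
--         if runs and runs[-1][0] == c:
--             runs[-1] = (c, runs[-1][1] + 1)
--         else:
--             runs.append((c, 1))
--     half = []
--     mid = ""
--     for c, k in runs:
--         half.extend([c] * (k // 2))
--         if k % 2 == 1:
--             mid = c
--     h = "".join(half)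
--     return h + mid + "".join(reversed(half))
-- ===== Notes on version B (the rewrite author's own statement) =====
-- stated objective: alternative
-- what changed: B sorts the lowercase letters of s and builds the palindrome from one run-length scan of the sorted list, instead of A's Counter plus a fixed a..z alphabet loop.
import Mathlib
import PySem

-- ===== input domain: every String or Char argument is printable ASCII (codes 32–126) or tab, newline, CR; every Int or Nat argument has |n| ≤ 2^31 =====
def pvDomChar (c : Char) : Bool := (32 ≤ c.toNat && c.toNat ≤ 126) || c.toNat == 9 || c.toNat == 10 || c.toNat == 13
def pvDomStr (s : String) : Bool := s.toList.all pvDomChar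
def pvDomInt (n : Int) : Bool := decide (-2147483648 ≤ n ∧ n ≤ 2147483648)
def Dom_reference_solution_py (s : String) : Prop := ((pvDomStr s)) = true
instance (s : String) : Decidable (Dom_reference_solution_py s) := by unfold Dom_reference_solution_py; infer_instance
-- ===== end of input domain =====

-- B replaces A's Counter + fixed a..z loop by sort-the-lowercase-letters + one run-length scan
-- (objective: alternative decomposition; same return value, no side effects in either version).

-- ===== PORT A =====
-- Counter(s) → PySem.Dict.counter; range(ord('a'), ord('z')+1) → pyRange 97 123;
-- chr(code) → Char.ofNat code.toNat (exact: every code here is 97..122);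
-- [char] * (counts[char] // 2): the count is ≥ 0, so `.toNat` of the floordiv is exact;
-- first_half[::-1] → slice? … (-1), always `some` since the step is nonzero.
def reference_solution_py (s : String) : String :=
  let counts := PySem.Dict.counter s.toList
  let st := (PySem.List.pyRange 97 123).foldl
    (fun (st : List Char × String) code =>
      let char := Char.ofNat code.toNat
      let cnt := counts.getD char 0
      if cnt > 0 then
        (st.1 ++ List.replicate (PySem.Int.floordiv cnt 2).toNat char,
         if PySem.Int.mod cnt 2 == 1 then String.ofList [char] else st.2)
      else st)
    ([], "")
  let first_half_str := String.ofList st.1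
  let second_half_str := String.ofList ((PySem.List.slice? st.1 none none (-1)).getD [])
  first_half_str ++ st.2 ++ second_half_str

-- ===== PORT B =====
-- run-building step of B's first loop: extend the last run or open a new one
-- (Python appends at the list's end; the port keeps `runs` reversed and reverses once after the loop)
def pvRunStep (runs : List (Char × Nat)) (c : Char) : List (Char × Nat) :=
  match runs with
  | (d, k) :: t => if d == c then (d, k + 1) :: t else (c, 1) :: (d, k) :: t
  | [] => [(c, 1)]

def reference_solution_py_alt (s : String) : String :=
  let chars := PySem.List.sorted (s.toList.filter (fun c => 'a' ≤ c && c ≤ 'z')) (fun x => x)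
  let runs := (chars.foldl pvRunStep []).reverse
  let st := runs.foldl
    (fun (st : List Char × String) r =>
      (st.1 ++ List.replicate (r.2 / 2) r.1,
       if r.2 % 2 == 1 then String.ofList [r.1] else st.2))
    ([], "")
  let h := String.ofList st.1
  h ++ st.2 ++ String.ofList st.1.reverse

-- ===== PRECONDITION & SPEC =====
def Spec_reference_solution_py (s : String) (out : String) : Prop := out = reference_solution_py_alt s
instance (s : String) (out : String) : Decidable (Spec_reference_solution_py s out) := by unfold Spec_reference_solution_py; infer_instance

-- ===== CLAIM (what is proved, stated in full; the proofs are below) =====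
def Claim_equal_reference_solution_py : Prop := ∀ (s : String), Dom_reference_solution_py s → Spec_reference_solution_py s (reference_solution_py s)

-- ===== LEMMAS AND PROOFS =====

-- the alphabet A iterates over, as characters
def pvAlph : List Char := (PySem.List.pyRange 97 123).map (fun i => Char.ofNat i.toNat)

-- the common per-letter accumulator step (append k/2 copies to the half; odd k sets the middle)
def pvG (st : List Char × String) (c : Char) (k : Nat) : List Char × String :=
  (st.1 ++ List.replicate (k / 2) c, if k % 2 == 1 then String.ofList [c] else st.2)

lemma pvAlph_nodup : pvAlph.Nodup := by decide

lemma pvAlph_lt : pvAlph.Pairwise (· < ·) := by decide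

lemma mem_pvAlph (c : Char) : c ∈ pvAlph ↔ (97 ≤ c.toNat ∧ c.toNat ≤ 122) := by
  constructor
  · intro h
    simp only [pvAlph, List.mem_map] at h
    obtain ⟨i, hi, rfl⟩ := h
    rw [PySem.List.mem_pyRange_one] at hi
    have hv : (Char.ofNat i.toNat).toNat = i.toNat := by
      rw [Char.toNat_ofNat, if_pos (Or.inl (by omega))]
    rw [hv]
    omega
  · rintro ⟨h1, h2⟩
    simp only [pvAlph, List.mem_map]
    exact ⟨(c.toNat : Int), by rw [PySem.List.mem_pyRange_one]; omega,
      by rw [Int.toNat_natCast, Char.ofNat_toNat]⟩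

lemma pvFilter_eq (c : Char) : (('a' ≤ c && c ≤ 'z') = true) ↔ (97 ≤ c.toNat ∧ c.toNat ≤ 122) := by
  rw [Bool.and_eq_true, decide_eq_true_iff, decide_eq_true_iff]
  exact Iff.rfl

lemma count_flatMap_replicate (n : Char → Nat) (x : Char) :
    ∀ cs : List Char, cs.Nodup →
      (cs.flatMap (fun d => List.replicate (n d) d)).count x = if x ∈ cs then n x else 0 := by
  intro cs
  induction cs with
  | nil => simp
  | cons c rest ih =>
    intro hnd
    rcases List.nodup_cons.mp hnd with ⟨hcm, hnd'⟩
    rw [List.flatMap_cons, List.count_append, List.count_replicate, ih hnd']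
    by_cases hx : x = c
    · subst hx
      simp [hcm]
    · simp [hx, Ne.symm hx]

lemma pairwise_flatMap_replicate (n : Char → Nat) :
    ∀ cs : List Char, cs.Pairwise (· < ·) →
      (cs.flatMap (fun d => List.replicate (n d) d)).Pairwise (· ≤ ·) := by
  intro cs
  induction cs with
  | nil => simp
  | cons c rest ih =>
    intro hp
    rcases List.pairwise_cons.mp hp with ⟨hlt, hp'⟩
    rw [List.flatMap_cons, List.pairwise_append]
    refine ⟨List.pairwise_replicate.mpr (Or.inr le_rfl), ih hp', ?_⟩
    intro a ha b hb
    rw [List.eq_of_mem_replicate ha]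
    rcases List.mem_flatMap.mp hb with ⟨d, hd, hbd⟩
    rw [List.eq_of_mem_replicate hbd]
    exact le_of_lt (hlt d hd)

lemma sorted_filter_eq_canon (l : List Char) :
    PySem.List.sorted (l.filter (fun c => 'a' ≤ c && c ≤ 'z')) (fun x => x)
      = pvAlph.flatMap (fun c => List.replicate (l.count c) c) := by
  apply PySem.List.sorted_id_eq_of_perm_of_pairwise
  · rw [List.perm_iff_count]
    intro a
    rw [count_flatMap_replicate _ a pvAlph pvAlph_nodup]
    by_cases hp : ('a' ≤ a && a ≤ 'z') = true
    · rw [if_pos ((mem_pvAlph a).mpr ((pvFilter_eq a).mp hp))]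
      exact (List.count_filter (p := fun c => 'a' ≤ c && c ≤ 'z') (a := a) (l := l) hp).symm
    · rw [if_neg (fun hm => hp ((pvFilter_eq a).mpr ((mem_pvAlph a).mp hm)))]
      exact (List.count_eq_zero (a := a)
        (l := l.filter (fun c => 'a' ≤ c && c ≤ 'z'))).mpr
        (fun hm => hp (List.of_mem_filter (p := fun c => 'a' ≤ c && c ≤ 'z') hm)) |>.symm
  · exact pairwise_flatMap_replicate _ pvAlph pvAlph_lt

lemma foldl_runStep_replicate (c : Char) (t : List (Char × Nat)) :
    ∀ (k m : Nat), List.foldl pvRunStep ((c, m) :: t) (List.replicate k c) = (c, m + k) :: t := by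
  intro k
  induction k with
  | zero => simp
  | succ j ih =>
    intro m
    rw [List.replicate_succ, List.foldl_cons]
    have h1 : pvRunStep ((c, m) :: t) c = (c, m + 1) :: t := by simp [pvRunStep]
    rw [h1, ih (m + 1)]
    ring_nf

lemma foldl_runStep_flat (n : Char → Nat) :
    ∀ (cs : List Char) (acc : List (Char × Nat)), cs.Nodup →
      (∀ d k t, acc = (d, k) :: t → d ∉ cs) →
      List.foldl pvRunStep acc (cs.flatMap (fun c => List.replicate (n c) c))
        = ((cs.filter (fun c => n c != 0)).map (fun c => (c, n c))).reverse ++ acc := by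
  intro cs
  induction cs with
  | nil => intro acc _ _; simp
  | cons c rest ih =>
    intro acc hnd hhead
    rcases List.nodup_cons.mp hnd with ⟨hcm, hnd'⟩
    rw [List.flatMap_cons, List.foldl_append]
    have hstep : List.foldl pvRunStep acc (List.replicate (n c) c) =
        if n c = 0 then acc else (c, n c) :: acc := by
      cases hk : n c with
      | zero => simp
      | succ m =>
        have h1 : pvRunStep acc c = (c, 1) :: acc := by
          cases acc with
          | nil => rfl
          | cons p t =>
            obtain ⟨d, k⟩ := p
            have hdc : (d == c) = false := by
              refine beq_eq_false_iff_ne.mpr (fun e => ?_)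
              exact (hhead d k t rfl) (e ▸ List.mem_cons_self)
            simp [pvRunStep, hdc]
        rw [List.replicate_succ, List.foldl_cons, h1, foldl_runStep_replicate]
        simp [Nat.add_comm]
    rw [hstep]
    by_cases h0 : n c = 0
    · rw [if_pos h0,
        ih acc hnd' (fun d k t he hm => hhead d k t he (List.mem_cons_of_mem _ hm))]
      simp [h0]
    · rw [if_neg h0,
        ih ((c, n c) :: acc) hnd' (by rintro d k t ⟨rfl, rfl⟩; exact hcm)]
      have hb : (n c != 0) = true := by simpa using h0
      simp [hb, List.reverse_cons, List.append_assoc]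

lemma foldl_skip_eq_filter (n : Char → Nat) :
    ∀ (cs : List Char) (init : List Char × String),
      cs.foldl (fun st c => if n c ≠ 0 then pvG st c (n c) else st) init
        = (((cs.filter (fun c => n c != 0)).map (fun c => (c, n c))).foldl
            (fun st r => pvG st r.1 r.2) init) := by
  intro cs
  induction cs with
  | nil => intro init; rfl
  | cons c rest ih =>
    intro init
    rw [List.foldl_cons]
    by_cases h0 : n c = 0
    · simp only [List.filter_cons, h0]
      simpa [h0] using ih init
    · have hb : (n c != 0) = true := by simpa using h0
      simp only [List.filter_cons, hb, if_pos, List.map_cons, List.foldl_cons]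
      simpa [h0] using ih (pvG init c (n c))

-- A's per-letter body, after `counts[char]` is read off as a plain count, is the skip-or-pvG step
lemma pvA_body_eq (l : List Char) (st : List Char × String) (c : Char) :
    (if (PySem.Dict.counter l).getD c 0 > 0 then
        (st.1 ++ List.replicate (PySem.Int.floordiv ((PySem.Dict.counter l).getD c 0) 2).toNat c,
         if PySem.Int.mod ((PySem.Dict.counter l).getD c 0) 2 == 1 then String.ofList [c] else st.2)
      else st)
      = if l.count c ≠ 0 then pvG st c (l.count c) else st := by
  rw [PySem.Dict.getD_counter]
  by_cases hk : l.count c = 0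
  · simp [hk]
  · have hpos : (0 : Int) < (l.count c : Int) := by exact_mod_cast Nat.pos_of_ne_zero hk
    rw [if_pos hpos, if_pos hk]
    have hfd : PySem.Int.floordiv ((l.count c : Nat) : Int) 2 = ((l.count c / 2 : Nat) : Int) :=
      PySem.Int.floordiv_natCast (l.count c) 2
    have hmd : PySem.Int.mod ((l.count c : Nat) : Int) 2 = ((l.count c % 2 : Nat) : Int) :=
      PySem.Int.mod_natCast (l.count c) 2
    rw [hfd, hmd, Int.toNat_natCast]
    unfold pvG
    by_cases hm : l.count c % 2 = 1
    · simp [hm]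
    · have h1 : (((l.count c % 2 : Nat) : Int) == 1) = false := by
        simpa using (by omega : ¬ ((l.count c % 2 : Nat) : Int) = 1)
      have h2 : (l.count c % 2 == 1) = false := by simpa using hm
      rw [h1, h2]

theorem pv_main (s : String) : reference_solution_py s = reference_solution_py_alt s := by
  have key :
      (PySem.List.pyRange 97 123).foldl
        (fun (st : List Char × String) code =>
          let char := Char.ofNat code.toNat
          let cnt := (PySem.Dict.counter s.toList).getD char 0
          if cnt > 0 then
            (st.1 ++ List.replicate (PySem.Int.floordiv cnt 2).toNat char,
             if PySem.Int.mod cnt 2 == 1 then String.ofList [char] else st.2)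
          else st)
        ([], "")
      = (((PySem.List.sorted (s.toList.filter (fun c => 'a' ≤ c && c ≤ 'z')) (fun x => x)).foldl
            pvRunStep []).reverse).foldl
          (fun (st : List Char × String) r =>
            (st.1 ++ List.replicate (r.2 / 2) r.1,
             if r.2 % 2 == 1 then String.ofList [r.1] else st.2))
          ([], "") := by
    rw [sorted_filter_eq_canon s.toList,
      foldl_runStep_flat (fun c => s.toList.count c) pvAlph [] pvAlph_nodup (by simp),
      List.append_nil, List.reverse_reverse]
    have hmap : (PySem.List.pyRange 97 123).foldl
        (fun (st : List Char × String) code =>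
          let char := Char.ofNat code.toNat
          let cnt := (PySem.Dict.counter s.toList).getD char 0
          if cnt > 0 then
            (st.1 ++ List.replicate (PySem.Int.floordiv cnt 2).toNat char,
             if PySem.Int.mod cnt 2 == 1 then String.ofList [char] else st.2)
          else st)
        ([], "")
        = pvAlph.foldl
            (fun st c => if s.toList.count c ≠ 0 then pvG st c (s.toList.count c) else st)
            ([], "") := by
      rw [pvAlph, List.foldl_map]
      congr 1
      funext st i
      exact pvA_body_eq s.toList st (Char.ofNat i.toNat)
    rw [hmap, foldl_skip_eq_filter (fun c => s.toList.count c) pvAlph ([], "")]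
    rfl
  show String.ofList _ ++ _ ++ String.ofList _ = _
  rw [reference_solution_py_alt]
  simp only [PySem.List.slice?_none_none_neg_one, Option.getD_some]
  rw [key]

-- ===== VERDICT (by name: the statement is the Claim_ definition above) =====
theorem reference_solution_py_spec : Claim_equal_reference_solution_py := by
  intro s _
  exact pv_main s
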